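-- pv_equiv track=rewrite | github.com/Carson7822/Python-Fundamentals-CSE174 | Projects/final_exam.py | neg_index
-- ===== SOURCE A (Python) =====
-- def neg_index(list1: list) -> str:
--     index = ''
--     index2 = ''
--     index_check = 0
--     for row in range(len(list1)):
--         for col in range(len(list1[row])):
--             if list1[row][col] < 0:
--                 if index_check == 0:
--                     num1 = str(row)
--                     num2 = str(col)
--                     index = '(' + num1 +', ' + num2 + '),'
--                     index_check += 1
--                 else:
--                     num1 = str(row)
--                     num2 = str(col)
--                     index2 = ' (' + num1 +', ' + num2 + '),'
--     index += index2
--     return index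
-- ===== SOURCE B (Python) =====
-- def neg_index(list1: list) -> str:
--     # Two short-circuit scans: forward for the first negative, backward for the last.
--     first = None
--     for r in range(len(list1)):
--         for c in range(len(list1[r])):
--             if list1[r][c] < 0:
--                 first = (r, c)
--                 break
--         if first is not None:
--             break
--     if first is None:
--         return ''
--     last = None
--     for r in range(len(list1) - 1, -1, -1):
--         for c in range(len(list1[r]) - 1, -1, -1):
--             if list1[r][c] < 0:
--                 last = (r, c)
--                 break
--         if last is not None:
--             break
--     out = '({}, {}),'.format(first[0], first[1])
--     if last != first:
--         out += ' ({}, {}),'.format(last[0], last[1])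
--     return out
-- ===== Notes on version B (the rewrite author's own statement) =====
-- stated objective: alternative
-- what changed: A makes one full accumulating scan of every cell updating first/last strings with a check flag; B does two short-circuit scans - a forward scan that breaks at the first negative and a backward scan that breaks at the last - and appends the second segment only when the two positions differ.
import Mathlib
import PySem

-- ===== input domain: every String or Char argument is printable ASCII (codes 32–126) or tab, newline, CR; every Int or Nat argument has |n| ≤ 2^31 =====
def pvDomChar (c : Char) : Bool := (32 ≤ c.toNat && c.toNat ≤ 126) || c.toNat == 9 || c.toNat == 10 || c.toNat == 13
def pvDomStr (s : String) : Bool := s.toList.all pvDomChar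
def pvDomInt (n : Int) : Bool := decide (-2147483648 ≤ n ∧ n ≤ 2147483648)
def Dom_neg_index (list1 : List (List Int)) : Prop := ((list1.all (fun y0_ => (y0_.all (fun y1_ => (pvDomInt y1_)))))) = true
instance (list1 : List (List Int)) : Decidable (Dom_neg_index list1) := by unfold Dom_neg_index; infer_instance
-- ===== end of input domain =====

-- B replaces A's single accumulating scan of every cell by two short-circuit scans
-- (forward for the first negative, backward for the last); objective: alternative decomposition.

-- ===== PORT A =====
-- A's loop body: the one negative-cell update of (index, index2, index_check)
def pvStepA (st : String × String × Int) (x : Int × Int × Int) : String × String × Int :=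
  if x.2.2 < 0 then
    if st.2.2 == 0 then
      ("(" ++ PySem.Int.toStr x.1 ++ ", " ++ PySem.Int.toStr x.2.1 ++ "),", st.2.1, st.2.2 + 1)
    else
      (st.1, " (" ++ PySem.Int.toStr x.1 ++ ", " ++ PySem.Int.toStr x.2.1 ++ "),", st.2.2)
  else st

def neg_index (list1 : List (List Int)) : String :=
  let st := (PySem.List.enumerate list1).foldl
    (fun st rrow =>
      (PySem.List.enumerate rrow.2).foldl (fun st cv => pvStepA st (rrow.1, cv.1, cv.2)) st)
    ("", "", 0)
  st.1 ++ st.2.1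

-- ===== PORT B =====
def pvFmtB (p : Int × Int) : String :=
  "(" ++ PySem.Int.toStr p.1 ++ ", " ++ PySem.Int.toStr p.2 ++ "),"

-- inner loop with break: first negative column in the given (index, value) order
def pvFindCol : List (Int × Int) → Option Int
  | [] => none
  | (c, v) :: rest => if v < 0 then some c else pvFindCol rest

-- forward row loop with break
def pvFindFwd : List (Int × List Int) → Option (Int × Int)
  | [] => none
  | (r, row) :: rest =>
    match pvFindCol (PySem.List.enumerate row) with
    | some c => some (r, c)
    | none => pvFindFwd rest

-- backward row loop with break (columns scanned in reverse)
def pvFindBwd : List (Int × List Int) → Option (Int × Int)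
  | [] => none
  | (r, row) :: rest =>
    match pvFindCol (PySem.List.enumerate row).reverse with
    | some c => some (r, c)
    | none => pvFindBwd rest

def neg_index_alt (list1 : List (List Int)) : String :=
  match pvFindFwd (PySem.List.enumerate list1) with
  | none => ""
  | some first =>
    match pvFindBwd (PySem.List.enumerate list1).reverse with
    | none => pvFmtB first  -- unreachable: a negative exists
    | some last =>
      if last ≠ first then pvFmtB first ++ " " ++ pvFmtB last else pvFmtB first

-- ===== PRECONDITION & SPEC =====
def Spec_neg_index (list1 : List (List Int)) (out : String) : Prop := out = neg_index_alt list1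
instance (list1 : List (List Int)) (out : String) : Decidable (Spec_neg_index list1 out) := by unfold Spec_neg_index; infer_instance

-- ===== CLAIM (what is proved, stated in full; the proofs are below) =====
def Claim_equal_neg_index : Prop := ∀ (list1 : List (List Int)), Dom_neg_index list1 → Spec_neg_index list1 (neg_index list1)

-- ===== LEMMAS AND PROOFS =====

-- the cell stream of A's nested loops, and its backward twin
def pvNegP (x : Int × Int × Int) : Bool := decide (x.2.2 < 0)

def pvCellsF (rows : List (Int × List Int)) : List (Int × Int × Int) :=
  rows.flatMap (fun p => (PySem.List.enumerate p.2).map (fun cv => (p.1, cv.1, cv.2)))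

def pvCellsB (rows : List (Int × List Int)) : List (Int × Int × Int) :=
  rows.flatMap (fun p => ((PySem.List.enumerate p.2).reverse).map (fun cv => (p.1, cv.1, cv.2)))

theorem pvFoldA_eq_cells (rows : List (Int × List Int)) (st : String × String × Int) :
    rows.foldl (fun st rrow =>
      (PySem.List.enumerate rrow.2).foldl (fun st cv => pvStepA st (rrow.1, cv.1, cv.2)) st) st
    = (pvCellsF rows).foldl pvStepA st := by
  induction rows generalizing st with
  | nil => rfl
  | cons p rest ih =>
    simp only [List.foldl_cons, pvCellsF, List.flatMap_cons, List.foldl_append, List.foldl_map]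
    exact ih _

theorem pvFoldA_filter (l : List (Int × Int × Int)) (st : String × String × Int) :
    l.foldl pvStepA st = (l.filter pvNegP).foldl pvStepA st := by
  induction l generalizing st with
  | nil => rfl
  | cons x rest ih =>
    by_cases h : x.2.2 < 0
    · simp only [List.filter_cons, pvNegP, h, decide_true, List.foldl_cons]; exact ih _
    · have hx : pvStepA st x = st := by simp [pvStepA, h]
      simp only [List.filter_cons, pvNegP, h, decide_false, List.foldl_cons, hx]; exact ih st

theorem pvFoldA_tail (xs : List (Int × Int × Int)) (h : ∀ x ∈ xs, x.2.2 < 0)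
    (i i2 : String) :
    xs.foldl pvStepA (i, i2, 1) =
      (i, (xs.getLast?.map (fun x => " (" ++ PySem.Int.toStr x.1 ++ ", " ++ PySem.Int.toStr x.2.1 ++ "),")).getD i2, 1) := by
  induction xs generalizing i2 with
  | nil => rfl
  | cons x rest ih =>
    have hx : x.2.2 < 0 := h x (by simp)
    have hstep : pvStepA (i, i2, 1) x =
        (i, " (" ++ PySem.Int.toStr x.1 ++ ", " ++ PySem.Int.toStr x.2.1 ++ "),", 1) := by
      simp [pvStepA, hx]
    cases rest with
    | nil => simp [List.foldl_cons, hstep]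
    | cons y ys =>
      rw [List.foldl_cons, hstep, ih (fun z hz => h z (by simp [hz]))]
      obtain ⟨z, hz⟩ : ∃ z, (y :: ys).getLast? = some z :=
        ⟨(y :: ys).getLast (by simp), List.getLast?_eq_some_getLast (by simp)⟩
      simp [List.getLast?_cons_cons, hz]

theorem pvNegIndex_char (list1 : List (List Int)) :
    neg_index list1 =
      match (pvCellsF (PySem.List.enumerate list1)).filter pvNegP with
      | [] => ""
      | x :: xs => ("(" ++ PySem.Int.toStr x.1 ++ ", " ++ PySem.Int.toStr x.2.1 ++ "),")
          ++ (xs.getLast?.map (fun y => " (" ++ PySem.Int.toStr y.1 ++ ", " ++ PySem.Int.toStr y.2.1 ++ "),")).getD "" := by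
  unfold neg_index
  rw [pvFoldA_eq_cells, pvFoldA_filter]
  cases hf : (pvCellsF (PySem.List.enumerate list1)).filter pvNegP with
  | nil => rfl
  | cons x xs =>
    have hx : x.2.2 < 0 := by
      have := List.mem_filter.mp (hf ▸ List.mem_cons_self (l := xs) (a := x))
      simpa [pvNegP] using this.2
    have hxs : ∀ z ∈ xs, z.2.2 < 0 := by
      intro z hz
      have := List.mem_filter.mp (hf ▸ List.mem_cons_of_mem x hz)
      simpa [pvNegP] using this.2
    have hstep : pvStepA ("", "", 0) x =
        ("(" ++ PySem.Int.toStr x.1 ++ ", " ++ PySem.Int.toStr x.2.1 ++ "),", "", 1) := by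
      simp [pvStepA, hx]
    simp only [List.foldl_cons, hstep, pvFoldA_tail xs hxs]

theorem pvFindCol_char (l : List (Int × Int)) :
    pvFindCol l = ((l.filter (fun cv => decide (cv.2 < 0))).head?).map Prod.fst := by
  induction l with
  | nil => rfl
  | cons cv rest ih =>
    obtain ⟨c, v⟩ := cv
    by_cases h : v < 0
    · simp [pvFindCol, h]
    · simp [pvFindCol, h, ih]

theorem pvFindFwd_char (rows : List (Int × List Int)) :
    pvFindFwd rows = ((pvCellsF rows).filter pvNegP).head?.map (fun x => (x.1, x.2.1)) := by
  induction rows with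
  | nil => rfl
  | cons p rest ih =>
    obtain ⟨r, row⟩ := p
    have hfil : ((PySem.List.enumerate row).map (fun cv => ((r : Int), cv.1, cv.2))).filter pvNegP
        = ((PySem.List.enumerate row).filter (fun cv => decide (cv.2 < 0))).map (fun cv => (r, cv.1, cv.2)) := by
      rw [List.filter_map]; rfl
    simp only [pvFindFwd, pvCellsF, List.flatMap_cons, List.filter_append, List.head?_append, hfil]
    rw [pvFindCol_char]
    cases hin : (PySem.List.enumerate row).filter (fun cv => decide (cv.2 < 0)) with
    | nil => simpa [pvCellsF] using ih
    | cons y ys => simp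

theorem pvFindBwd_char (rows : List (Int × List Int)) :
    pvFindBwd rows = ((pvCellsB rows).filter pvNegP).head?.map (fun x => (x.1, x.2.1)) := by
  induction rows with
  | nil => rfl
  | cons p rest ih =>
    obtain ⟨r, row⟩ := p
    have hfil : (((PySem.List.enumerate row).reverse).map (fun cv => ((r : Int), cv.1, cv.2))).filter pvNegP
        = (((PySem.List.enumerate row).reverse).filter (fun cv => decide (cv.2 < 0))).map (fun cv => (r, cv.1, cv.2)) := by
      rw [List.filter_map]; rfl
    simp only [pvFindBwd, pvCellsB, List.flatMap_cons, List.filter_append, List.head?_append, hfil]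
    rw [pvFindCol_char]
    cases hin : ((PySem.List.enumerate row).reverse).filter (fun cv => decide (cv.2 < 0)) with
    | nil => simpa [pvCellsB] using ih
    | cons y ys => simp

theorem pvCellsB_reverse (rows : List (Int × List Int)) :
    pvCellsB rows.reverse = (pvCellsF rows).reverse := by
  unfold pvCellsF pvCellsB
  rw [List.reverse_flatMap]
  congr 1
  funext p
  simp [List.map_reverse]

-- cells come in strictly increasing (row, col) position order
def pvLt (a b : Int × Int × Int) : Prop := a.1 < b.1 ∨ (a.1 = b.1 ∧ a.2.1 < b.2.1)

theorem pvCellsF_pairwise (list1 : List (List Int)) :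
    (pvCellsF (PySem.List.enumerate list1)).Pairwise pvLt := by
  unfold pvCellsF
  rw [List.flatMap_def, List.pairwise_flatten]
  constructor
  · intro l hl
    simp only [List.mem_map] at hl
    obtain ⟨p, _, rfl⟩ := hl
    refine List.Pairwise.map _ ?_ (PySem.List.pairwise_lt_enumerate p.2 0)
    intro a b hab
    exact Or.inr ⟨rfl, hab⟩
  · refine List.Pairwise.map _ ?_ (PySem.List.pairwise_lt_enumerate list1 0)
    intro p q hpq x hx y hy
    simp only [List.mem_map] at hx hy
    obtain ⟨a, _, rfl⟩ := hx
    obtain ⟨b, _, rfl⟩ := hy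
    exact Or.inl hpq

theorem pvLt_ne_pos {a b : Int × Int × Int} (h : pvLt a b) : (a.1, a.2.1) ≠ (b.1, b.2.1) := by
  rcases h with h | ⟨h1, h2⟩ <;> intro he <;> injection he with e1 e2 <;> omega

-- ===== VERDICT (by name: the statement is the Claim_ definition above) =====
theorem neg_index_spec : Claim_equal_neg_index := by
  intro list1 _
  unfold Spec_neg_index neg_index_alt
  rw [pvNegIndex_char, pvFindFwd_char, pvFindBwd_char, pvCellsB_reverse, List.filter_reverse,
    List.head?_reverse]
  have hpw := (pvCellsF_pairwise list1).sublist (l₁ := (pvCellsF (PySem.List.enumerate list1)).filter pvNegP) List.filter_sublist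
  cases hf : (pvCellsF (PySem.List.enumerate list1)).filter pvNegP with
  | nil => rfl
  | cons x xs =>
    rw [hf] at hpw
    cases hxs : xs with
    | nil => simp [pvFmtB]
    | cons y ys =>
      subst hxs
      obtain ⟨z, hz⟩ : ∃ z, (y :: ys).getLast? = some z :=
        ⟨(y :: ys).getLast (by simp), List.getLast?_eq_some_getLast (by simp)⟩
      have hzmem : z ∈ y :: ys := List.mem_of_getLast? hz
      have hne : (z.1, z.2.1) ≠ (x.1, x.2.1) :=
        fun he => pvLt_ne_pos (List.rel_of_pairwise_cons hpw hzmem) he.symm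
      simp only [List.getLast?_cons_cons, hz, List.head?_cons, Option.map_some, Option.getD_some]
      rw [if_pos hne]
      simp [pvFmtB, String.append_assoc]
      rw [show (" (" : String) = " " ++ "(" from rfl,
        show ("), " : String) = ")," ++ " " from rfl, String.append_assoc,
        String.append_assoc]
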